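-- pv_equiv track=rewrite | github.com/SB-0025/ai-code-debugger | backend/build_dataset.py | inject_indentation_error
-- ===== SOURCE A (Python) =====
-- def inject_indentation_error(code):
--     """Remove indentation from first indented line"""
--     lines = code.split('\n')
--     for i, line in enumerate(lines):
--         if line.startswith('    '):  # 4 spaces
--             original = line
--             buggy = line.lstrip()
--             buggy_code = '\n'.join(lines[:i] + [buggy] + lines[i+1:])
--             return (
--                 buggy_code,
--                 "IndentationError",
--                 "Missing or incorrect indentation",
--                 code,  # Full original code
--                 "Use consistent indentation (4 spaces per level in Python)"
--             )
--     return None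
-- ===== SOURCE B (Python) =====
-- def inject_indentation_error(code):
--     """Remove indentation from first indented line (raw-string scan, no split/join)"""
--     if code.startswith('    '):
--         start = 0
--     else:
--         pos = code.find('\n    ')
--         if pos == -1:
--             return None
--         start = pos + 1
--     end = start
--     while end < len(code) and code[end] in ' \t\r':
--         end += 1
--     return (
--         code[:start] + code[end:],
--         "IndentationError",
--         "Missing or incorrect indentation",
--         code,
--         "Use consistent indentation (4 spaces per level in Python)"
--     )
-- ===== Notes on version B (the rewrite author's own statement) =====
-- stated objective: alternative
-- what changed: B never splits the string into lines: it locates the first indented line start directly in the raw string (the string itself begins with four spaces, or the first newline immediately followed by four spaces), skips that line's leading whitespace run in place, and splices the prefix and the remainder together, instead of A's split/enumerate/lstrip/join pipeline.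
import Mathlib
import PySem

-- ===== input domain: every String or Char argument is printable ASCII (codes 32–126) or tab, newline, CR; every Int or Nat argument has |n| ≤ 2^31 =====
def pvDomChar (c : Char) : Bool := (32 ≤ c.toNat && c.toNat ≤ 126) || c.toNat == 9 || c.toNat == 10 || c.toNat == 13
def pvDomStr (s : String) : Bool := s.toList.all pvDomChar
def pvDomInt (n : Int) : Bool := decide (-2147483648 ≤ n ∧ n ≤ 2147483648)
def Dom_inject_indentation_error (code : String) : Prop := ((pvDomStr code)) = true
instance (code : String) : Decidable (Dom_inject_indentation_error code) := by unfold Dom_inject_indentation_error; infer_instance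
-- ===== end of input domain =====

-- B replaces A's split-into-lines / enumerate / lstrip / join pipeline by a raw-string scan
-- (find the first indented line start, skip its whitespace run, splice the string); same result, no speed claim.

-- ===== PORT A =====
-- the 'for i, line in enumerate(lines): if line.startswith("    "): …' loop
def pvFindIndent : Nat → List (List Char) → Option (Nat × List Char)
  | _, [] => none
  | i, line :: rest =>
    if PySem.Chars.startswith line [' ', ' ', ' ', ' '] then some (i, line)
    else pvFindIndent (i + 1) rest

def inject_indentation_error (code : String) : Option (String × String × String × String × String) :=
  let lines := PySem.Chars.splitOn code.toList ['\n']
  match pvFindIndent 0 lines with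
  | none => none
  | some (i, line) =>
    let buggy := PySem.Chars.lstrip line
    let buggy_code := PySem.Chars.join ['\n'] (lines.take i ++ [buggy] ++ lines.drop (i + 1))
    some (String.mk buggy_code, "IndentationError", "Missing or incorrect indentation", code,
      "Use consistent indentation (4 spaces per level in Python)")

-- ===== PORT B =====
-- the 'while end < len(code) and code[end] in " \t\r": end += 1' loop, as the length of the run
def pvWsSkip : List Char → Nat
  | [] => 0
  | c :: rest => if c = ' ' || c = '\t' || c = '\r' then pvWsSkip rest + 1 else 0

def inject_indentation_error_alt (code : String) : Option (String × String × String × String × String) :=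
  let cs := code.toList
  let start? : Option Nat :=
    if PySem.Chars.startswith cs [' ', ' ', ' ', ' '] then some 0
    else
      let pos := PySem.Chars.find cs ['\n', ' ', ' ', ' ', ' ']
      if pos = -1 then none else some (pos.toNat + 1)
  match start? with
  | none => none
  | some start =>
    let «end» := start + pvWsSkip (cs.drop start)
    some (String.mk (cs.take start ++ cs.drop «end»), "IndentationError",
      "Missing or incorrect indentation", code,
      "Use consistent indentation (4 spaces per level in Python)")

-- ===== PRECONDITION & SPEC =====
def Spec_inject_indentation_error (code : String) (out : Option (String × String × String × String × String)) : Prop := out = inject_indentation_error_alt code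
instance (code : String) (out : Option (String × String × String × String × String)) : Decidable (Spec_inject_indentation_error code out) := by unfold Spec_inject_indentation_error; infer_instance

-- ===== CLAIM (what is proved, stated in full; the proofs are below) =====
def Claim_equal_inject_indentation_error : Prop := ∀ (code : String), Dom_inject_indentation_error code → Spec_inject_indentation_error code (inject_indentation_error code)

-- ===== LEMMAS AND PROOFS =====

-- ============ proof helpers ============

def lineSplit : List Char → List (List Char)
  | [] => [[]]
  | c :: rest =>
    if c = '\n' then [] :: lineSplit rest
    else
      match lineSplit rest with
      | [] => [[c]]
      | x :: xs => (c :: x) :: xs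

theorem lineSplit_ne_nil (cs : List Char) : lineSplit cs ≠ [] := by
  cases cs with
  | nil => simp [lineSplit]
  | cons c rest =>
    simp only [lineSplit]
    split
    · simp
    · split <;> simp

theorem splitOn_go_eq (fuel : Nat) : ∀ (l cur : List Char) (acc : List (List Char)),
    l.length ≤ fuel →
    PySem.Chars.splitOn.go ['\n'] fuel l cur acc =
      acc.reverse ++ (match lineSplit l with
        | [] => []
        | x :: xs => (cur.reverse ++ x) :: xs) := by
  induction fuel with
  | zero =>
    intro l cur acc h
    have : l = [] := by cases l <;> simp_all
    subst this
    rw [PySem.Chars.splitOn.go.eq_def]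
    simp [lineSplit]
  | succ fuel ih =>
    intro l cur acc h
    cases l with
    | nil =>
      rw [PySem.Chars.splitOn.go.eq_def]
      simp [lineSplit]
    | cons c rest =>
      rw [PySem.Chars.splitOn.go.eq_def]
      simp only []
      by_cases hc : c = '\n'
      · subst hc
        have hpre : List.isPrefixOf ['\n'] ('\n' :: rest) = true := by
          simp [List.isPrefixOf]
        rw [if_pos hpre]
        simp only [List.length_cons, List.length_nil, List.drop_succ_cons, List.drop_zero]
        rw [ih rest [] ((cur.reverse) :: acc) (by simpa using Nat.le_of_succ_le_succ h)]
        obtain ⟨x, xs, hx⟩ : ∃ x xs, lineSplit rest = x :: xs := by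
          cases hxx : lineSplit rest with
          | nil => exact absurd hxx (lineSplit_ne_nil rest)
          | cons x xs => exact ⟨x, xs, rfl⟩
        simp [lineSplit, hx]
      · have hpre : List.isPrefixOf ['\n'] (c :: rest) = false := by
          simp [List.isPrefixOf]
          intro hh
          exact absurd hh.symm hc
        rw [if_neg (by simp [hpre])]
        rw [ih rest (c :: cur) acc (by simpa using Nat.le_of_succ_le_succ h)]
        obtain ⟨x, xs, hx⟩ : ∃ x xs, lineSplit rest = x :: xs := by
          cases hxx : lineSplit rest with
          | nil => exact absurd hxx (lineSplit_ne_nil rest)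
          | cons x xs => exact ⟨x, xs, rfl⟩
        simp [lineSplit, hx, hc]

theorem splitOn_eq_lineSplit (cs : List Char) :
    PySem.Chars.splitOn cs ['\n'] = lineSplit cs := by
  unfold PySem.Chars.splitOn
  rw [splitOn_go_eq (cs.length + 1) cs [] [] (by omega)]
  obtain ⟨x, xs, hx⟩ : ∃ x xs, lineSplit cs = x :: xs := by
    cases hxx : lineSplit cs with
    | nil => exact absurd hxx (lineSplit_ne_nil cs)
    | cons x xs => exact ⟨x, xs, rfl⟩
  simp [hx]

theorem join_cons_of_ne_nil (a : List Char) (ls : List (List Char)) (h : ls ≠ []) :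
    PySem.Chars.join ['\n'] (a :: ls) = a ++ '\n' :: PySem.Chars.join ['\n'] ls := by
  cases ls with
  | nil => exact absurd rfl h
  | cons b bs => rw [PySem.Chars.join_cons_cons]; simp

theorem lineSplit_no_nl (cs : List Char) (h : '\n' ∉ cs) : lineSplit cs = [cs] := by
  induction cs with
  | nil => rfl
  | cons c rest ih =>
    have hc : ¬ c = '\n' := by intro hh; exact h (by simp [hh])
    have := ih (by intro hm; exact h (by simp [hm]))
    simp [lineSplit, hc, this]

theorem lineSplit_append (l r : List Char) (h : '\n' ∉ l) :
    lineSplit (l ++ '\n' :: r) = l :: lineSplit r := by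
  induction l with
  | nil => simp [lineSplit]
  | cons c rest ih =>
    have hc : ¬ c = '\n' := by intro hh; exact h (by simp [hh])
    have := ih (by intro hm; exact h (by simp [hm]))
    simp [lineSplit, hc, this]

theorem join_cons_head (c : Char) (x : List Char) (xs : List (List Char)) :
    PySem.Chars.join ['\n'] ((c :: x) :: xs) = c :: PySem.Chars.join ['\n'] (x :: xs) := by
  cases xs with
  | nil => simp [PySem.Chars.join_singleton]
  | cons y ys => rw [PySem.Chars.join_cons_cons, PySem.Chars.join_cons_cons]; simp

theorem join_lineSplit (cs : List Char) :
    PySem.Chars.join ['\n'] (lineSplit cs) = cs := by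
  induction cs with
  | nil => simp [lineSplit, PySem.Chars.join_singleton]
  | cons c rest ih =>
    by_cases hc : c = '\n'
    · subst hc
      rw [show lineSplit ('\n' :: rest) = [] :: lineSplit rest from by simp [lineSplit]]
      rw [join_cons_of_ne_nil [] _ (lineSplit_ne_nil rest)]
      simp [ih]
    · obtain ⟨x, xs, hx⟩ : ∃ x xs, lineSplit rest = x :: xs := by
        cases hxx : lineSplit rest with
        | nil => exact absurd hxx (lineSplit_ne_nil rest)
        | cons x xs => exact ⟨x, xs, rfl⟩
      rw [show lineSplit (c :: rest) = (c :: x) :: xs from by simp [lineSplit, hc, hx]]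
      rw [join_cons_head, ← hx, ih]

-- whitespace-run lemmas
theorem pvWsSkip_le_length (cs : List Char) : pvWsSkip cs ≤ cs.length := by
  induction cs with
  | nil => simp [pvWsSkip]
  | cons c rest ih =>
    simp only [pvWsSkip]
    split
    · simp; omega
    · simp

theorem pvWsSkip_append_nl (l r : List Char) :
    pvWsSkip (l ++ '\n' :: r) = pvWsSkip l := by
  induction l with
  | nil =>
    show pvWsSkip ('\n' :: r) = pvWsSkip []
    simp [pvWsSkip]
  | cons c rest ih =>
    simp only [List.cons_append, pvWsSkip]
    split <;> simp [ih]

theorem char_toNat_eq_iff (c d : Char) : c = d ↔ c.toNat = d.toNat := by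
  constructor
  · intro h; subst h; rfl
  · intro h; exact Char.ext (UInt32.toNat_inj.mp h)

theorem lstrip_eq_drop_wsSkip (l : List Char) (hdom : ∀ c ∈ l, pvDomChar c = true)
    (hnl : '\n' ∉ l) : PySem.Chars.lstrip l = l.drop (pvWsSkip l) := by
  induction l with
  | nil => rfl
  | cons c rest ih =>
    have hd : (decide (32 ≤ c.toNat) && decide (c.toNat ≤ 126)
        || c.toNat == 9 || c.toNat == 10 || c.toNat == 13) = true := hdom c (by simp)
    have hc : c.toNat ≠ 10 := by
      intro hh
      exact hnl (by simp [(char_toNat_eq_iff c '\n').mpr hh])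
    have h32 := char_toNat_eq_iff c ' '
    have h9 := char_toNat_eq_iff c '\t'
    have h13 := char_toNat_eq_iff c '\r'
    by_cases hw : c.toNat = 32 ∨ c.toNat = 9 ∨ c.toNat = 13
    · have hsp : PySem.Chars.isspace c = true := by
        simp only [PySem.Chars.isspace]
        simp only [Bool.or_eq_true, Bool.and_eq_true, decide_eq_true_eq]
        clear h32 h9 h13
        omega
      have hwb : (c = ' ' || c = '\t' || c = '\r') = true := by
        have t32 : (' ').toNat = 32 := by decide
        have t9 : ('\t').toNat = 9 := by decide
        have t13 : ('\r').toNat = 13 := by decide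
        simp only [Bool.or_eq_true, decide_eq_true_eq, h32, h9, h13, t32, t9, t13]
        omega
      simp only [PySem.Chars.lstrip, List.dropWhile_cons, hsp, if_true, pvWsSkip, hwb,
        List.drop_succ_cons]
      simpa [PySem.Chars.lstrip] using
        ih (fun x hx => hdom x (by simp [hx])) (fun hm => hnl (by simp [hm]))
    · have hsp : PySem.Chars.isspace c = false := by
        simp only [PySem.Chars.isspace]
        simp only [Bool.or_eq_false_iff, Bool.and_eq_false_iff, decide_eq_false_iff_not]
        simp only [Bool.or_eq_true, Bool.and_eq_true, decide_eq_true_eq, beq_iff_eq] at hd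
        clear h32 h9 h13
        omega
      have hwb : (c = ' ' || c = '\t' || c = '\r') = false := by
        have t32 : (' ').toNat = 32 := by decide
        have t9 : ('\t').toNat = 9 := by decide
        have t13 : ('\r').toNat = 13 := by decide
        simp only [Bool.or_eq_false_iff, decide_eq_false_iff_not, h32, h9, h13, t32, t9, t13]
        omega
      simp [PySem.Chars.lstrip, hsp, pvWsSkip, hwb]

-- A-side loop characterisation
def findIndentZ : List (List Char) → Option (Nat × List Char)
  | [] => none
  | l :: r =>
    if PySem.Chars.startswith l [' ', ' ', ' ', ' '] then some (0, l)
    else (findIndentZ r).map (fun p => (p.1 + 1, p.2))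

theorem pvFindIndent_eq (ls : List (List Char)) : ∀ i : Nat,
    pvFindIndent i ls = (findIndentZ ls).map (fun p => (i + p.1, p.2)) := by
  induction ls with
  | nil => intro i; rfl
  | cons l r ih =>
    intro i
    simp only [pvFindIndent, findIndentZ]
    split
    · simp
    · rw [ih (i + 1)]
      cases findIndentZ r with
      | none => simp
      | some p => simp; omega

def coreA (cs : List Char) : Option (List Char) :=
  match findIndentZ (lineSplit cs) with
  | none => none
  | some (i, line) =>
    some (PySem.Chars.join ['\n'] ((lineSplit cs).take i
      ++ [PySem.Chars.lstrip line] ++ (lineSplit cs).drop (i + 1)))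

def coreB (cs : List Char) : Option (List Char) :=
  if PySem.Chars.startswith cs [' ', ' ', ' ', ' '] then
    some (cs.drop (pvWsSkip cs))
  else if PySem.Chars.find cs ['\n', ' ', ' ', ' ', ' '] = -1 then none
  else
    let start := (PySem.Chars.find cs ['\n', ' ', ' ', ' ', ' ']).toNat + 1
    some (cs.take start ++ cs.drop (start + pvWsSkip (cs.drop start)))

def mkOut (code : String) (b : List Char) : String × String × String × String × String :=
  (String.mk b, "IndentationError", "Missing or incorrect indentation", code,
    "Use consistent indentation (4 spaces per level in Python)")

theorem A_eq_coreA (code : String) :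
    inject_indentation_error code = (coreA code.toList).map (mkOut code) := by
  simp only [inject_indentation_error, coreA]
  rw [splitOn_eq_lineSplit, pvFindIndent_eq _ 0]
  cases findIndentZ (lineSplit code.toList) with
  | none => simp
  | some p => simp [mkOut]

theorem B_eq_coreB (code : String) :
    inject_indentation_error_alt code = (coreB code.toList).map (mkOut code) := by
  by_cases h1 : PySem.Chars.startswith code.toList [' ', ' ', ' ', ' '] = true
  · simp [inject_indentation_error_alt, coreB, h1, mkOut]
  · by_cases h2 : PySem.Chars.find code.toList ['\n', ' ', ' ', ' ', ' '] = -1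
    · simp [inject_indentation_error_alt, coreB, h1, h2]
    · simp [inject_indentation_error_alt, coreB, h1, h2, mkOut]

-- find-side helper lemmas
theorem find_eq_of_first (cs sub : List Char) (k : Nat)
    (h1 : sub <+: cs.drop k) (h2 : ∀ i < k, ¬ sub <+: cs.drop i) :
    PySem.Chars.find cs sub = k := by
  have hin : PySem.Chars.isIn sub cs = true :=
    (PySem.Chars.exists_prefix_drop_iff_isIn sub cs).1 ⟨k, h1⟩
  have h0 : 0 ≤ PySem.Chars.find cs sub :=
    (PySem.Chars.find_nonneg_iff cs sub).2 ((PySem.Chars.isIn_iff_infix sub cs).1 hin)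
  obtain ⟨hp, hmin⟩ := PySem.Chars.find_spec h0
  have htn : (PySem.Chars.find cs sub).toNat = k := by
    rcases Nat.lt_trichotomy (PySem.Chars.find cs sub).toNat k with h | h | h
    · exact absurd hp (h2 _ h)
    · exact h
    · exact absurd h1 (hmin k h)
  omega

theorem find_eq_neg_one_of (cs sub : List Char)
    (h : ∀ j, ¬ sub <+: cs.drop j) : PySem.Chars.find cs sub = -1 := by
  rw [PySem.Chars.find_eq_neg_one_iff]
  intro hinf
  obtain ⟨j, hj⟩ := (PySem.Chars.exists_prefix_drop_iff_isIn sub cs).2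
    ((PySem.Chars.isIn_iff_infix sub cs).2 hinf)
  exact h j hj

theorem drop_lt_no_match (l r : List Char) (hnl : '\n' ∉ l) (j : Nat) (hj : j < l.length) :
    ¬ ['\n', ' ', ' ', ' ', ' '] <+: (l ++ '\n' :: r).drop j := by
  intro hp
  rw [List.drop_append_of_le_length (Nat.le_of_lt hj), List.drop_eq_getElem_cons hj] at hp
  rw [List.cons_append, List.cons_prefix_cons] at hp
  exact hnl (hp.1 ▸ List.getElem_mem hj)

theorem drop_at_boundary (l r : List Char) : (l ++ '\n' :: r).drop l.length = '\n' :: r := by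
  rw [List.drop_append_of_le_length (Nat.le_refl _), List.drop_length, List.nil_append]

theorem drop_beyond (l r : List Char) (k : Nat) :
    (l ++ '\n' :: r).drop (l.length + 1 + k) = r.drop k := by
  rw [List.drop_append]
  have h1 : List.drop (l.length + 1 + k) l = [] := List.drop_eq_nil_of_le (by omega)
  have h2 : l.length + 1 + k - l.length = 1 + k := by omega
  rw [h1, h2, List.nil_append]
  rw [show (1 + k) = k + 1 by omega, List.drop_succ_cons]

theorem take_split (l r : List Char) (k : Nat) :
    (l ++ '\n' :: r).take (l.length + 1 + k) = l ++ '\n' :: r.take k := by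
  rw [List.take_append]
  have h1 : List.take (l.length + 1 + k) l = l := List.take_of_length_le (by omega)
  have h2 : l.length + 1 + k - l.length = 1 + k := by omega
  rw [h1, h2, show (1 + k) = k + 1 by omega, List.take_succ_cons]

theorem find_decomp (l r : List Char) (hnl : '\n' ∉ l) :
    PySem.Chars.find (l ++ '\n' :: r) ['\n', ' ', ' ', ' ', ' '] =
      if PySem.Chars.startswith r [' ', ' ', ' ', ' '] = true then (l.length : Int)
      else if PySem.Chars.find r ['\n', ' ', ' ', ' ', ' '] = -1 then -1
      else (l.length : Int) + 1 + PySem.Chars.find r ['\n', ' ', ' ', ' ', ' '] := by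
  by_cases hr : PySem.Chars.startswith r [' ', ' ', ' ', ' '] = true
  · rw [if_pos hr]
    apply find_eq_of_first
    · rw [drop_at_boundary, List.cons_prefix_cons]
      exact ⟨rfl, (PySem.Chars.startswith_iff r _).1 hr⟩
    · exact fun i hi => drop_lt_no_match l r hnl i hi
  · rw [if_neg hr]
    by_cases hfr : PySem.Chars.find r ['\n', ' ', ' ', ' ', ' '] = -1
    · rw [if_pos hfr]
      apply find_eq_neg_one_of
      intro j hp
      rcases Nat.lt_trichotomy j l.length with h | h | h
      · exact drop_lt_no_match l r hnl j h hp
      · subst h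
        rw [drop_at_boundary, List.cons_prefix_cons] at hp
        exact hr ((PySem.Chars.startswith_iff r _).2 hp.2)
      · have hj : j = l.length + 1 + (j - l.length - 1) := by omega
        rw [hj, drop_beyond] at hp
        rw [PySem.Chars.find_eq_neg_one_iff] at hfr
        exact hfr ((PySem.Chars.isIn_iff_infix _ r).1
          ((PySem.Chars.exists_prefix_drop_iff_isIn _ r).1 ⟨_, hp⟩))
    · rw [if_neg hfr]
      have h0 : 0 ≤ PySem.Chars.find r ['\n', ' ', ' ', ' ', ' '] := by
        have := PySem.Chars.neg_one_le_find r ['\n', ' ', ' ', ' ', ' ']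
        omega
      obtain ⟨hp, hmin⟩ := PySem.Chars.find_spec h0
      set p := (PySem.Chars.find r ['\n', ' ', ' ', ' ', ' ']).toNat with hpdef
      have : PySem.Chars.find (l ++ '\n' :: r) ['\n', ' ', ' ', ' ', ' ']
          = (l.length + 1 + p : Nat) := by
        apply find_eq_of_first
        · rw [drop_beyond]; exact hp
        · intro i hi
          rcases Nat.lt_trichotomy i l.length with h | h | h
          · exact drop_lt_no_match l r hnl i h
          · subst h
            rw [drop_at_boundary]
            intro hpre
            rw [List.cons_prefix_cons] at hpre
            exact hr ((PySem.Chars.startswith_iff r _).2 hpre.2)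
          · have hj : i = l.length + 1 + (i - l.length - 1) := by omega
            rw [hj, drop_beyond]
            exact hmin _ (by omega)
      rw [this]
      push_cast
      omega

theorem stepA (l r : List Char) (hnl : '\n' ∉ l)
    (hswl : ¬ PySem.Chars.startswith l [' ', ' ', ' ', ' '] = true) :
    coreA (l ++ '\n' :: r) = (coreA r).map (fun b => l ++ '\n' :: b) := by
  unfold coreA
  rw [lineSplit_append l r hnl]
  simp only [findIndentZ, if_neg hswl]
  cases h : findIndentZ (lineSplit r) with
  | none => simp
  | some p =>
    obtain ⟨i, line⟩ := p
    simp only [Option.map_some]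
    congr 1
    rw [show i + 1 + 1 = i + 1 + 1 from rfl]
    rw [List.take_succ_cons, List.drop_succ_cons]
    rw [show (l :: List.take i (lineSplit r)) ++ [PySem.Chars.lstrip line]
        ++ List.drop (i + 1) (lineSplit r)
      = l :: (List.take i (lineSplit r) ++ [PySem.Chars.lstrip line]
        ++ List.drop (i + 1) (lineSplit r)) from by simp]
    rw [join_cons_of_ne_nil _ _ (by simp)]

theorem stepB (l r : List Char) (hnl : '\n' ∉ l)
    (hsw : ¬ PySem.Chars.startswith (l ++ '\n' :: r) [' ', ' ', ' ', ' '] = true) :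
    coreB (l ++ '\n' :: r) = (coreB r).map (fun b => l ++ '\n' :: b) := by
  unfold coreB
  rw [if_neg hsw, find_decomp l r hnl]
  by_cases hr : PySem.Chars.startswith r [' ', ' ', ' ', ' '] = true
  · rw [if_pos hr, if_pos hr]
    rw [if_neg (by omega)]
    simp only [Int.toNat_natCast, Option.map_some]
    congr 1
    have ht : (l ++ '\n' :: r).take (l.length + 1) = l ++ ['\n'] := by
      have := take_split l r 0
      simpa using this
    have hd0 : (l ++ '\n' :: r).drop (l.length + 1) = r := by
      have := drop_beyond l r 0
      simpa using this
    rw [ht, hd0]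
    have hd1 : (l ++ '\n' :: r).drop (l.length + 1 + pvWsSkip r) = r.drop (pvWsSkip r) :=
      drop_beyond l r (pvWsSkip r)
    rw [hd1]
    simp
  · rw [if_neg hr, if_neg hr]
    by_cases hfr : PySem.Chars.find r ['\n', ' ', ' ', ' ', ' '] = -1
    · rw [if_pos hfr, if_pos hfr]
      simp
    · rw [if_neg hfr, if_neg hfr]
      have h0 : 0 ≤ PySem.Chars.find r ['\n', ' ', ' ', ' ', ' '] := by
        have := PySem.Chars.neg_one_le_find r ['\n', ' ', ' ', ' ', ' ']
        omega
      rw [if_neg (by omega)]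
      simp only [Option.map_some]
      congr 1
      set p := (PySem.Chars.find r ['\n', ' ', ' ', ' ', ' ']).toNat with hpdef
      have htn : ((l.length : Int) + 1 + PySem.Chars.find r ['\n', ' ', ' ', ' ', ' ']).toNat + 1
          = l.length + 1 + (p + 1) := by omega
      rw [htn]
      rw [take_split l r (p + 1), drop_beyond l r (p + 1)]
      have hd2 : (l ++ '\n' :: r).drop (l.length + 1 + (p + 1) + pvWsSkip (r.drop (p + 1)))
          = r.drop (p + 1 + pvWsSkip (r.drop (p + 1))) := by
        have := drop_beyond l r (p + 1 + pvWsSkip (r.drop (p + 1)))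
        rw [← this]
        congr 1
        omega
      rw [hd2]
      simp

theorem prefix_boundary (l r : List Char) (hnl : '\n' ∉ l)
    (h : [' ', ' ', ' ', ' '] <+: l ++ '\n' :: r) : [' ', ' ', ' ', ' '] <+: l := by
  rcases l with _ | ⟨a, _ | ⟨b, _ | ⟨c, _ | ⟨d, t⟩⟩⟩⟩ <;>
    simp [List.cons_prefix_cons] at h ⊢ <;> tauto

theorem nl_decomp (cs : List Char) :
    '\n' ∉ cs ∨ ∃ l r, cs = l ++ '\n' :: r ∧ '\n' ∉ l := by
  induction cs with
  | nil => left; simp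
  | cons c rest ih =>
    by_cases hc : c = '\n'
    · right; exact ⟨[], rest, by simp [hc], by simp⟩
    · rcases ih with h | ⟨l, r, he, hl⟩
      · left; simp [hc]; exact ⟨fun hh => hc hh.symm, h⟩
      · right
        refine ⟨c :: l, r, by simp [he], ?_⟩
        simp
        exact ⟨fun hh => hc hh.symm, hl⟩

theorem coreAB (n : Nat) : ∀ cs : List Char, cs.length ≤ n →
    (∀ c ∈ cs, pvDomChar c = true) → coreA cs = coreB cs := by
  induction n with
  | zero =>
    intro cs hlen _
    have : cs = [] := by cases cs <;> simp_all
    subst this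
    decide
  | succ n ih =>
    intro cs hlen hdom
    rcases nl_decomp cs with hno | ⟨l, r, he, hnl⟩
    · -- single line, no '\n'
      have hls : lineSplit cs = [cs] := lineSplit_no_nl cs hno
      by_cases hsw : PySem.Chars.startswith cs [' ', ' ', ' ', ' '] = true
      · unfold coreA coreB
        rw [hls, if_pos hsw]
        simp only [findIndentZ, if_pos hsw]
        simp only [List.take_zero, List.nil_append, Nat.zero_add, List.drop_succ_cons,
          List.drop_nil, List.append_nil, PySem.Chars.join_singleton]
        rw [lstrip_eq_drop_wsSkip cs hdom hno]
      · unfold coreA coreB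
        rw [hls, if_neg hsw]
        simp only [findIndentZ, if_neg hsw]
        have hf : PySem.Chars.find cs ['\n', ' ', ' ', ' ', ' '] = -1 := by
          apply find_eq_neg_one_of
          intro j hp
          exact hno (List.mem_of_mem_drop (hp.subset (by simp)))
        rw [if_pos hf]
        simp
    · subst he
      by_cases hsw : PySem.Chars.startswith (l ++ '\n' :: r) [' ', ' ', ' ', ' '] = true
      · -- first line of the string is the indented one
        have hswl : PySem.Chars.startswith l [' ', ' ', ' ', ' '] = true :=
          (PySem.Chars.startswith_iff l _).2
            (prefix_boundary l r hnl ((PySem.Chars.startswith_iff _ _).1 hsw))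
        unfold coreA coreB
        rw [lineSplit_append l r hnl, if_pos hsw]
        simp only [findIndentZ, if_pos hswl]
        simp only [List.take_zero, Nat.zero_add, List.drop_succ_cons, List.drop_zero,
          List.nil_append, List.singleton_append]
        rw [join_cons_of_ne_nil _ _ (lineSplit_ne_nil r), join_lineSplit]
        rw [pvWsSkip_append_nl l r]
        rw [List.drop_append_of_le_length (pvWsSkip_le_length l)]
        rw [lstrip_eq_drop_wsSkip l (fun c hc => hdom c (by simp [hc]))
          (fun hm => hnl hm)]
      · have hswl : ¬ PySem.Chars.startswith l [' ', ' ', ' ', ' '] = true := by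
          intro h
          exact hsw ((PySem.Chars.startswith_iff _ _).2
            (((PySem.Chars.startswith_iff l _).1 h).trans (l.prefix_append _)))
        rw [stepA l r hnl hswl, stepB l r hnl hsw]
        rw [ih r (by simp at hlen; omega) (fun c hc => hdom c (by simp [hc]))]


-- ===== VERDICT (by name: the statement is the Claim_ definition above) =====
theorem inject_indentation_error_spec : Claim_equal_inject_indentation_error := by
  intro code hdom
  unfold Spec_inject_indentation_error
  rw [A_eq_coreA, B_eq_coreB]
  congr 1
  apply coreAB code.toList.length _ (Nat.le_refl _)
  intro c hc
  unfold Dom_inject_indentation_error pvDomStr at hdom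
  exact List.all_eq_true.mp hdom c hc
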